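-- pv_equiv track=rewrite | github.com/dlagez/ai-center-v6 | src/workflow/excel_update/exporter.py | _cell_reference_sort_key
-- ===== SOURCE A (Python) =====
-- def _cell_reference_sort_key(cell_ref: str) -> tuple[int, int]:
--     column = ""
--     row = ""
--     for char in cell_ref:
--         if char.isalpha():
--             column += char
--         elif char.isdigit():
--             row += char
--     return (_column_index(column), int(row or "0"))
--
-- def _column_index(column_letters: str) -> int:
--     value = 0
--     for char in column_letters.upper():
--         value = value * 26 + (ord(char) - 64)
--     return value
-- ===== SOURCE B (Python) =====
-- def _cell_reference_sort_key(cell_ref: str) -> tuple[int, int]: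
--     # Back-to-front scan with explicit place values: each character contributes
--     # value * weight where the weights (26^k for letters, 10^k for digits) grow
--     # as we move left, instead of A's build-strings-then-refold Horner scheme.
--     col = 0
--     row = 0
--     col_weight = 1
--     row_weight = 1
--     for ch in reversed(cell_ref):
--         if ch.isalpha():
--             col += (ord(ch.upper()) - 64) * col_weight
--             col_weight *= 26
--         elif ch.isdigit():
--             row += (ord(ch) - 48) * row_weight
--             row_weight *= 10
--     return (col, row)
-- ===== Notes on version B (the rewrite author's own statement) =====
-- stated objective: alternative
-- what changed: A builds a letter string and a digit string in a forward pass and then re-folds them (Horner via _column_index, int() for the row); B scans the reference backwards once, summing each character's value times an explicit place-value weight (26^k / 10^k) maintained as it moves left, with no intermediate strings, no helper and no parse.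
import Mathlib
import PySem

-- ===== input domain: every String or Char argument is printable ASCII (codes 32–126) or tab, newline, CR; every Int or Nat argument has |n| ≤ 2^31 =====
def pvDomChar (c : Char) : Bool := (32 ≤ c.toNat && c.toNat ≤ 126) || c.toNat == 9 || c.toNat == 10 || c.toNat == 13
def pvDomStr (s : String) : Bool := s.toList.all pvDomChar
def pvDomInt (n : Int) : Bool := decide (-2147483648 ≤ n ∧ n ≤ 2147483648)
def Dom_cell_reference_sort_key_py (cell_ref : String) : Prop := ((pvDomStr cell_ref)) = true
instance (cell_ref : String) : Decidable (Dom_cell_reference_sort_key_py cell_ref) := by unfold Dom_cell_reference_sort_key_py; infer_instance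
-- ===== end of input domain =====

-- B replaces A's build-two-strings-then-refold (helper _column_index plus int()) by one
-- backwards scan summing value * explicit place-value weight (26^k / 10^k); return value only.

-- ===== PORT A =====
-- Python strings built character by character are carried as List Char.
-- helper _column_index: value = 0; for char in column_letters.upper(): value = value*26 + (ord(char)-64)
def pv_column_index (column_letters : List Char) : Int :=
  (PySem.Chars.upper column_letters).foldl (fun value ch => value * 26 + ((ch.toNat : Int) - 64)) 0

-- hand port of Python's int(s): exact when s is a non-empty string of ASCII digits, which is the
-- only shape A ever feeds it (row is built from isdigit characters, or is "0"); per-digit value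
-- via PySem.Int.digitVal?.
def pv_int_digits (cs : List Char) : Int :=
  cs.foldl (fun v c => v * 10 + (((PySem.Int.digitVal? c).getD 0 : Nat) : Int)) 0

def cell_reference_sort_key_py (cell_ref : String) : Int × Int :=
  let p := cell_ref.toList.foldl
    (fun (acc : List Char × List Char) ch =>
      if PySem.Chars.isalpha ch then (acc.1 ++ [ch], acc.2)
      else if PySem.Chars.isdigit ch then (acc.1, acc.2 ++ [ch])
      else acc) ([], [])
  (pv_column_index p.1, pv_int_digits (if p.2 = [] then ['0'] else p.2))

-- ===== PORT B =====
-- Source B: for ch in reversed(cell_ref): accumulate value * weight, weight *= base.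
-- State (col, row, col_weight, row_weight); reversed(...) is .reverse.
def cell_reference_sort_key_py_alt (cell_ref : String) : Int × Int :=
  let r := cell_ref.toList.reverse.foldl
    (fun (acc : Int × Int × Int × Int) ch =>
      if PySem.Chars.isalpha ch then
        (acc.1 + (((PySem.Chars.upperChar ch).toNat : Int) - 64) * acc.2.2.1,
         acc.2.1, acc.2.2.1 * 26, acc.2.2.2)
      else if PySem.Chars.isdigit ch then
        (acc.1, acc.2.1 + ((ch.toNat : Int) - 48) * acc.2.2.2,
         acc.2.2.1, acc.2.2.2 * 10)
      else acc) (0, 0, 1, 1)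
  (r.1, r.2.1)

-- ===== PRECONDITION & SPEC =====
def Spec_cell_reference_sort_key_py (cell_ref : String) (out : Int × Int) : Prop := out = cell_reference_sort_key_py_alt cell_ref
instance (cell_ref : String) (out : Int × Int) : Decidable (Spec_cell_reference_sort_key_py cell_ref out) := by unfold Spec_cell_reference_sort_key_py; infer_instance

-- ===== CLAIM (what is proved, stated in full; the proofs are below) =====
def Claim_equal_cell_reference_sort_key_py : Prop := ∀ (cell_ref : String), Dom_cell_reference_sort_key_py cell_ref → Spec_cell_reference_sort_key_py cell_ref (cell_reference_sort_key_py cell_ref)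

-- ===== LEMMAS AND PROOFS =====

-- the letter/digit subsequences A collects (elif: a digit branch fires only when not alpha)
def pv_letters (l : List Char) : List Char := l.filter PySem.Chars.isalpha
def pv_digs (l : List Char) : List Char :=
  l.filter (fun c => !PySem.Chars.isalpha c && PySem.Chars.isdigit c)

-- Horner folds with the per-character values both programs use
def pv_hornerC (v : Int) (cs : List Char) : Int :=
  cs.foldl (fun v c => v * 26 + (((PySem.Chars.upperChar c).toNat : Int) - 64)) v
def pv_hornerD (v : Int) (cs : List Char) : Int :=
  cs.foldl (fun v c => v * 10 + ((c.toNat : Int) - 48)) v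

lemma pv_column_index_eq (cs : List Char) : pv_column_index cs = pv_hornerC 0 cs := by
  simp [pv_column_index, pv_hornerC, PySem.Chars.upper, List.foldl_map]

lemma pv_digitVal_int (c : Char) (h : PySem.Chars.isdigit c = true) :
    (((PySem.Int.digitVal? c).getD 0 : Nat) : Int) = (c.toNat : Int) - 48 := by
  simp only [PySem.Chars.isdigit, Bool.and_eq_true, decide_eq_true_eq, Char.le_def,
    UInt32.le_iff_toNat_le] at h
  have hd : c.isDigit = true := by
    simp only [Char.isDigit, Bool.and_eq_true, decide_eq_true_eq, ge_iff_le,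
      UInt32.le_iff_toNat_le]
    exact ⟨h.1, h.2⟩
  simp only [PySem.Int.digitVal?, hd, if_true, Option.getD_some]
  have hc : c.toNat = c.val.toNat := rfl
  have h0 : ('0' : Char).val.toNat = 48 := by decide
  have h9 : ('9' : Char).val.toNat = 57 := by decide
  omega

lemma pv_int_digits_eq (rs : List Char) (h : ∀ c ∈ rs, PySem.Chars.isdigit c = true) :
    pv_int_digits (if rs = [] then ['0'] else rs) = pv_hornerD 0 rs := by
  by_cases hrs : rs = []
  · subst hrs; decide
  · simp only [hrs, if_false]
    unfold pv_int_digits pv_hornerD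
    exact PySem.List.foldl_congr_mem rs _ _ 0
      (fun acc x hx => by rw [pv_digitVal_int x (h x hx)])

-- A's splitting loop collects exactly the two filtered subsequences
lemma pv_split (l : List Char) : ∀ (cs rs : List Char),
    l.foldl
      (fun (acc : List Char × List Char) ch =>
        if PySem.Chars.isalpha ch then (acc.1 ++ [ch], acc.2)
        else if PySem.Chars.isdigit ch then (acc.1, acc.2 ++ [ch])
        else acc) (cs, rs) = (cs ++ pv_letters l, rs ++ pv_digs l) := by
  induction l with
  | nil => intro cs rs; simp [pv_letters, pv_digs]
  | cons ch l ih =>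
    intro cs rs
    by_cases ha : PySem.Chars.isalpha ch = true
    · simp only [List.foldl_cons, ha, if_true]
      rw [ih]
      simp [pv_letters, pv_digs, ha]
    · by_cases hd : PySem.Chars.isdigit ch = true
      · simp only [List.foldl_cons, ha, hd, if_true]
        rw [ih]
        simp [pv_letters, pv_digs, ha, hd]
      · simp only [List.foldl_cons, ha, hd]
        rw [ih]
        simp [pv_letters, pv_digs, ha, hd]

-- Horner fold shift: folding from v instead of 0 adds v * base^length
lemma pv_hornerC_shift (cs : List Char) : ∀ v : Int,
    pv_hornerC v cs = v * 26 ^ cs.length + pv_hornerC 0 cs := by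
  induction cs with
  | nil => intro v; simp [pv_hornerC]
  | cons c cs ih =>
    intro v
    have hL : ∀ w : Int, pv_hornerC w (c :: cs)
        = pv_hornerC (w * 26 + (((PySem.Chars.upperChar c).toNat : Int) - 64)) cs := fun _ => rfl
    rw [hL v, hL 0,
        ih (v * 26 + (((PySem.Chars.upperChar c).toNat : Int) - 64)),
        ih (0 * 26 + (((PySem.Chars.upperChar c).toNat : Int) - 64))]
    simp only [List.length_cons, pow_succ]
    ring

lemma pv_hornerD_shift (cs : List Char) : ∀ v : Int,
    pv_hornerD v cs = v * 10 ^ cs.length + pv_hornerD 0 cs := by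
  induction cs with
  | nil => intro v; simp [pv_hornerD]
  | cons c cs ih =>
    intro v
    have hL : ∀ w : Int, pv_hornerD w (c :: cs)
        = pv_hornerD (w * 10 + ((c.toNat : Int) - 48)) cs := fun _ => rfl
    rw [hL v, hL 0,
        ih (v * 10 + ((c.toNat : Int) - 48)),
        ih (0 * 10 + ((c.toNat : Int) - 48))]
    simp only [List.length_cons, pow_succ]
    ring

-- B's backwards loop, characterised: after consuming l (front-to-back as a foldr, since the
-- reversed foldl is a foldr), the state is the two Horner values plus the two weights.
lemma pv_back (l : List Char) :
    l.foldr
      (fun ch (acc : Int × Int × Int × Int) =>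
        if PySem.Chars.isalpha ch then
          (acc.1 + (((PySem.Chars.upperChar ch).toNat : Int) - 64) * acc.2.2.1,
           acc.2.1, acc.2.2.1 * 26, acc.2.2.2)
        else if PySem.Chars.isdigit ch then
          (acc.1, acc.2.1 + ((ch.toNat : Int) - 48) * acc.2.2.2,
           acc.2.2.1, acc.2.2.2 * 10)
        else acc) (0, 0, 1, 1) =
    (pv_hornerC 0 (pv_letters l), pv_hornerD 0 (pv_digs l),
     26 ^ (pv_letters l).length, 10 ^ (pv_digs l).length) := by
  induction l with
  | nil => simp [pv_letters, pv_digs, pv_hornerC, pv_hornerD]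
  | cons ch l ih =>
    by_cases ha : PySem.Chars.isalpha ch = true
    · simp only [List.foldr_cons, ih]
      rw [if_pos ha]
      have : pv_letters (ch :: l) = ch :: pv_letters l := by simp [pv_letters, ha]
      rw [this]
      have h2 : pv_digs (ch :: l) = pv_digs l := by simp [pv_digs, ha]
      rw [h2]
      have : pv_hornerC 0 (ch :: pv_letters l)
          = (((PySem.Chars.upperChar ch).toNat : Int) - 64) * 26 ^ (pv_letters l).length
            + pv_hornerC 0 (pv_letters l) := by
        show pv_hornerC (0 * 26 + _) (pv_letters l) = _
        rw [pv_hornerC_shift]; ring_nf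
      rw [this]
      simp [List.length_cons, pow_succ]
      ring_nf
    · by_cases hd : PySem.Chars.isdigit ch = true
      · simp only [List.foldr_cons, ih]
        rw [if_neg ha, if_pos hd]
        have : pv_letters (ch :: l) = pv_letters l := by simp [pv_letters, ha]
        rw [this]
        have h2 : pv_digs (ch :: l) = ch :: pv_digs l := by simp [pv_digs, ha, hd]
        rw [h2]
        have : pv_hornerD 0 (ch :: pv_digs l)
            = ((ch.toNat : Int) - 48) * 10 ^ (pv_digs l).length + pv_hornerD 0 (pv_digs l) := by
          show pv_hornerD (0 * 10 + _) (pv_digs l) = _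
          rw [pv_hornerD_shift]; ring_nf
        rw [this]
        simp [List.length_cons, pow_succ]
        ring_nf
      · simp only [List.foldr_cons, ih]
        rw [if_neg ha, if_neg hd]
        have : pv_letters (ch :: l) = pv_letters l := by simp [pv_letters, ha]
        rw [this]
        have h2 : pv_digs (ch :: l) = pv_digs l := by simp [pv_digs, ha, hd]
        rw [h2]

-- ===== VERDICT (by name: the statement is the Claim_ definition above) =====
theorem cell_reference_sort_key_py_spec : Claim_equal_cell_reference_sort_key_py := by
  intro s _
  unfold Spec_cell_reference_sort_key_py
  simp only [cell_reference_sort_key_py, cell_reference_sort_key_py_alt, List.foldl_reverse,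
    pv_split]
  rw [pv_back]
  simp only [List.nil_append]
  rw [pv_column_index_eq,
      pv_int_digits_eq (pv_digs s.toList)
        (by intro c hc; simp [pv_digs, List.mem_filter] at hc; exact hc.2.2)]
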